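-- pv_equiv track=rewrite | github.com/andycyca/python_utils | str2bin.py | str2bin
-- ===== SOURCE A (Python) =====
-- def char2bin(letter):
--     '''Returns a naive, non-standard binary encoding of a single character. '''
--     aleph = 'abcdefghijklmnopqrstuvwxyzABCDEFGHIJKLMNOPQRSTUVWXYZ0123456789. '
--     if letter in aleph:
--         result = format(aleph.index(letter), '08b') + ' '
--     else:
--         result = format(64, '08b') + ' '
--     return result
--
-- def str2bin(string, row=5):
--     '''Returns a naive binary encoding of string.'''
--     binaried = ''
--     for letter in string:
--         binaried += char2bin(letter)
--     formatted = ''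
--     for idx, bit in enumerate(binaried):
--         if idx % ((9 * row)) == 0 and idx > 0:
--             formatted += '\n'
--         formatted += bit
--     return formatted
-- ===== SOURCE B (Python) =====
-- def _code(c):
--     '''O(1) arithmetic replacement for the alphabet scan in char2bin.'''
--     o = ord(c)
--     if 97 <= o <= 122:        # a-z -> 0..25
--         n = o - 97
--     elif 65 <= o <= 90:       # A-Z -> 26..51
--         n = o - 65 + 26
--     elif 48 <= o <= 57:       # 0-9 -> 52..61
--         n = o - 48 + 52
--     elif c == '.':
--         n = 62
--     elif c == ' ':
--         n = 63
--     else: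
--         n = 64
--     return format(n, '08b') + ' '
--
-- def str2bin(string, row=5):
--     '''Returns a naive binary encoding of string.'''
--     return ''.join(
--         ('\n' if idx > 0 and idx % row == 0 else '') + _code(c)
--         for idx, c in enumerate(string)
--     )
-- ===== Notes on version B (the rewrite author's own statement) =====
-- stated objective: faster
-- what changed: Replaces the 64-character alphabet scan (aleph.index) by O(1) ordinal arithmetic on ord(c), and fuses A's two passes (build the full bit string, then re-scan it bit by bit with idx % (9*row)) into one generator over the characters (break decided by idx % row) joined once.
import Mathlib
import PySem

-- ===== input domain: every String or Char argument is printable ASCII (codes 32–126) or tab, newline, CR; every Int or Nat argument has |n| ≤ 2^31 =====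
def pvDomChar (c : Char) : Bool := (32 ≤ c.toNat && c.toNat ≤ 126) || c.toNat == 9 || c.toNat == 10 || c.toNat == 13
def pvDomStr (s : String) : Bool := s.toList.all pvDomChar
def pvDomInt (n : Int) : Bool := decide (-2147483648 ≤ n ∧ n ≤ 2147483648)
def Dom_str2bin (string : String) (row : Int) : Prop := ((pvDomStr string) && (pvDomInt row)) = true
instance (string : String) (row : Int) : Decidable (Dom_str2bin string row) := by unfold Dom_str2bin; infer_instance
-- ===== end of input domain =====

-- B replaces A's table scan by O(1) ordinal arithmetic and fuses A's two passes (build the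
-- full bit string, then re-scan it bit by bit) into one pass over the characters: faster by a constant factor.

-- ===== PORT A =====
-- format(n, '08b') : exact for 0 ≤ n < 256, the only values used (0..64)
def fmt08b (n : Nat) : List Char :=
  (List.range 8).reverse.map (fun i => if n.testBit i then '1' else '0')

def alephChars : List Char :=
  "abcdefghijklmnopqrstuvwxyzABCDEFGHIJKLMNOPQRSTUVWXYZ0123456789. ".toList

-- 'letter in aleph' / 'aleph.index(letter)': exact via list membership / idxOf since letter is a single char
def char2binP (letter : Char) : List Char :=
  if alephChars.contains letter then fmt08b (alephChars.idxOf letter) ++ [' ']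
  else fmt08b 64 ++ [' ']

def str2bin (string : String) (row : Int) : String :=
  let binaried : List Char :=
    string.toList.foldl (fun acc letter => acc ++ char2binP letter) []
  let formatted : List Char :=
    (PySem.List.enumerate binaried).foldl
      (fun acc p =>
        (if PySem.Int.mod p.1 (9 * row) = 0 ∧ p.1 > 0 then acc ++ ['\n'] else acc) ++ [p.2]) []
  String.ofList formatted

-- ===== PORT B =====
-- B's _code: the branch ladder on ord(c), exact for every character
def codeB (c : Char) : List Char :=
  let o := c.toNat
  (if 97 ≤ o ∧ o ≤ 122 then fmt08b (o - 97)
   else if 65 ≤ o ∧ o ≤ 90 then fmt08b (o - 65 + 26)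
   else if 48 ≤ o ∧ o ≤ 57 then fmt08b (o - 48 + 52)
   else if c = '.' then fmt08b 62
   else if c = ' ' then fmt08b 63
   else fmt08b 64) ++ [' ']

-- B's single generator expression: separator-plus-code chunk per (idx, c), joined once
def str2bin_alt (string : String) (row : Int) : String :=
  String.ofList
    ((PySem.List.enumerate string.toList).flatMap
      (fun p => (if p.1 > 0 ∧ PySem.Int.mod p.1 row = 0 then ['\n'] else []) ++ codeB p.2))

-- ===== PRECONDITION & SPEC =====
-- Pre_ excludes exactly the inputs where A raises ZeroDivisionError (row = 0 with a nonempty string).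
def Pre_str2bin (string : String) (row : Int) : Prop := string = "" ∨ row ≠ 0
instance (string : String) (row : Int) : Decidable (Pre_str2bin string row) := by unfold Pre_str2bin; infer_instance
def pvWitness_str2bin : String × Int := ("ab", 2)

def Spec_str2bin (string : String) (row : Int) (out : String) : Prop := out = str2bin_alt string row
instance (string : String) (row : Int) (out : String) : Decidable (Spec_str2bin string row out) := by unfold Spec_str2bin; infer_instance

-- ===== CLAIM (what is proved, stated in full; the proofs are below) =====
def Claim_equal_str2bin : Prop := ∀ (string : String) (row : Int), Dom_str2bin string row → Pre_str2bin string row → Spec_str2bin string row (str2bin string row)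

-- ===== LEMMAS AND PROOFS =====

-- the per-element chunk A's formatting loop appends for bit p.2 at bit index p.1
def gA (row : Int) : Int × Char → List Char :=
  fun p => (if PySem.Int.mod p.1 (9 * row) = 0 ∧ p.1 > 0 then ['\n'] else []) ++ [p.2]

-- the per-element chunk B's generator yields for character p.2 at character index p.1
def gB (row : Int) : Int × Char → List Char :=
  fun p => (if p.1 > 0 ∧ PySem.Int.mod p.1 row = 0 then ['\n'] else []) ++ codeB p.2

-- B's arithmetic code agrees with A's table scan on every domain character
set_option maxRecDepth 40000 in
lemma code_eq (c : Char) (h : pvDomChar c = true) : codeB c = char2binP c := by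
  have h127 : c.toNat < 127 := by
    simp only [pvDomChar, Bool.or_eq_true, Bool.and_eq_true, decide_eq_true_eq,
      beq_iff_eq] at h
    rcases h with ((⟨h1, h2⟩ | h) | h) | h <;> omega
  have key : ∀ n ∈ List.range 127, codeB (Char.ofNat n) = char2binP (Char.ofNat n) := by decide
  have := key c.toNat (List.mem_range.mpr h127)
  rwa [Char.ofNat_toNat] at this

lemma char2binP_shape (c : Char) : ∃ a t, char2binP c = a :: t ∧ t.length = 8 := by
  unfold char2binP fmt08b
  split <;> simp [List.range_succ]

lemma notbreak (row i : Int) (h : ¬ (9:Int) ∣ i)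
    (hm : PySem.Int.mod i (9 * row) = 0) : False := by
  rw [PySem.Int.mod_eq_zero_iff_dvd] at hm
  exact h (dvd_trans (dvd_mul_right 9 row) hm)

-- a segment of bits none of which triggers a break passes through A's formatting loop unchanged
lemma segId (row : Int) : ∀ (l : List Char) (s : Int),
    (∀ j : Nat, j < l.length → ¬ ((9:Int) ∣ (s + j))) →
    (PySem.List.enumerate l s).flatMap (gA row) = l := by
  intro l
  induction l with
  | nil => intro s _; simp [PySem.List.enumerate_nil]
  | cons a t ih =>
    intro s h
    rw [PySem.List.enumerate_cons, List.flatMap_cons]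
    have h0 : ¬ (PySem.Int.mod s (9 * row) = 0 ∧ s > 0) := by
      rintro ⟨hm, -⟩
      exact notbreak row s (by have := h 0 (by simp); simpa using this) hm
    rw [ih (s + 1) (by intro j hj; have := h (j + 1) (by simpa using hj); push_cast at this ⊢; omega)]
    simp [gA, h0]

-- one character's 9-bit block through A's formatting loop = B's chunk for that character
lemma perChar (row k : Int) (c : Char) (hc : pvDomChar c = true) :
    (PySem.List.enumerate (char2binP c) (9 * k)).flatMap (gA row) = gB row (k, c) := by
  obtain ⟨a, t, hct, ht⟩ := char2binP_shape c
  rw [hct, PySem.List.enumerate_cons, List.flatMap_cons]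
  rw [segId row t (9 * k + 1) (by intro j hj; rw [ht] at hj; omega)]
  have hiff : PySem.Int.mod (9 * k) (9 * row) = 0 ↔ PySem.Int.mod k row = 0 := by
    rw [PySem.Int.mod_eq_zero_iff_dvd, PySem.Int.mod_eq_zero_iff_dvd]
    exact mul_dvd_mul_iff_left (by norm_num : (9:Int) ≠ 0)
  have hcode : codeB c = a :: t := by rw [code_eq c hc, hct]
  simp [gA, gB, hcode]
  have hc2 : (PySem.Int.mod (9 * k) (9 * row) = 0 ∧ 0 < k)
      ↔ (0 < k ∧ PySem.Int.mod k row = 0) := by rw [hiff]; tauto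
  simp only [hc2]

lemma char2binP_length (c : Char) : (char2binP c).length = 9 := by
  obtain ⟨a, t, hct, ht⟩ := char2binP_shape c
  simp [hct, ht]

lemma mainLem (row : Int) : ∀ (cs : List Char), (∀ c ∈ cs, pvDomChar c = true) → ∀ (k : Int),
    (PySem.List.enumerate (cs.flatMap char2binP) (9 * k)).flatMap (gA row)
      = (PySem.List.enumerate cs k).flatMap (gB row) := by
  intro cs
  induction cs with
  | nil => intro _ k; simp [PySem.List.enumerate_nil]
  | cons c cs ih =>
    intro hdom k
    rw [List.flatMap_cons, PySem.List.enumerate_append, List.flatMap_append,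
        PySem.List.enumerate_cons, List.flatMap_cons,
        perChar row k c (hdom c (by simp))]
    congr 1
    rw [char2binP_length]
    have h9 : 9 * k + ((9:Nat):Int) = 9 * (k + 1) := by push_cast; ring
    rw [h9]
    exact ih (fun x hx => hdom x (by simp [hx])) (k + 1)

lemma A_closed (string : String) (row : Int) :
    str2bin string row
      = String.ofList ((PySem.List.enumerate (string.toList.flatMap char2binP)).flatMap (gA row)) := by
  unfold str2bin
  rw [PySem.List.foldl_append_eq_flatMap, List.nil_append]
  have hfun : ∀ (acc : List Char) (p : Int × Char),
      ((if PySem.Int.mod p.1 (9 * row) = 0 ∧ p.1 > 0 then acc ++ ['\n'] else acc) ++ [p.2])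
        = acc ++ gA row p := by
    intro acc p; by_cases h : PySem.Int.mod p.1 (9 * row) = 0 ∧ p.1 > 0 <;> simp [gA, h]
  simp only [hfun]
  rw [PySem.List.foldl_append_eq_flatMap, List.nil_append]

-- ===== VERDICT (by name: the statement is the Claim_ definition above) =====
theorem str2bin_spec : Claim_equal_str2bin := by
  intro string row hdom _
  unfold Spec_str2bin
  rw [A_closed]
  unfold str2bin_alt
  have hchars : ∀ c ∈ string.toList, pvDomChar c = true := by
    unfold Dom_str2bin pvDomStr at hdom
    simp only [Bool.and_eq_true, List.all_eq_true] at hdom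
    exact fun c hc => hdom.1 c hc
  have := mainLem row string.toList hchars 0
  simp only [mul_zero] at this
  rw [this]
  rfl
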